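-- pv_equiv track=rewrite | github.com/vinerya/quantum_forge | circuit_cutter.py | _map_bitstring_to_original
-- ===== SOURCE A (Python) =====
-- from typing import List, Dict, Tuple, Set
--
-- def _map_bitstring_to_original(bitstring: str,
--                              qubit_mapping: Dict[int, int]) -> str:
--     """Map a bitstring from subcircuit qubits to original circuit qubits"""
--     # Convert bitstring to list of bits
--     bits = list(bitstring)
--
--     # Create mapped bitstring
--     mapped_bits = ['0'] * (max(qubit_mapping.values()) + 1)
--     for subcircuit_idx, bit in enumerate(bits):
--         if subcircuit_idx in qubit_mapping:
--             mapped_bits[qubit_mapping[subcircuit_idx]] = bit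
--
--     return ''.join(mapped_bits)
-- ===== SOURCE B (Python) =====
-- def _map_bitstring_to_original(bitstring: str, qubit_mapping) -> str:
--     """Map a bitstring from subcircuit qubits to original circuit qubits.
--
--     Gather formulation: build an inverse index (original position -> source
--     subcircuit index) once, then fill each output slot by one lookup."""
--     limit = max(qubit_mapping.values()) + 1
--     n = len(bitstring)
--     inverse = {}
--     for idx in sorted(qubit_mapping):      # ascending: largest source index wins ties
--         if 0 <= idx < n:
--             inverse[qubit_mapping[idx]] = idx
--     return ''.join(bitstring[inverse[pos]] if pos in inverse else '0'
--                    for pos in range(limit))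
-- ===== Notes on version B (the rewrite author's own statement) =====
-- stated objective: alternative
-- what changed: Replaces A's scatter loop (allocate a '0' buffer, write each input bit through the mapping) by a gather: build an inverse index from original position to source subcircuit index once over the sorted keys, then fill each output slot by one dictionary lookup.
-- outside the precondition, e.g. on _map_bitstring_to_original('10', {0: 2, 1: -1}): A returns '000', B returns '001'
import Mathlib
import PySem

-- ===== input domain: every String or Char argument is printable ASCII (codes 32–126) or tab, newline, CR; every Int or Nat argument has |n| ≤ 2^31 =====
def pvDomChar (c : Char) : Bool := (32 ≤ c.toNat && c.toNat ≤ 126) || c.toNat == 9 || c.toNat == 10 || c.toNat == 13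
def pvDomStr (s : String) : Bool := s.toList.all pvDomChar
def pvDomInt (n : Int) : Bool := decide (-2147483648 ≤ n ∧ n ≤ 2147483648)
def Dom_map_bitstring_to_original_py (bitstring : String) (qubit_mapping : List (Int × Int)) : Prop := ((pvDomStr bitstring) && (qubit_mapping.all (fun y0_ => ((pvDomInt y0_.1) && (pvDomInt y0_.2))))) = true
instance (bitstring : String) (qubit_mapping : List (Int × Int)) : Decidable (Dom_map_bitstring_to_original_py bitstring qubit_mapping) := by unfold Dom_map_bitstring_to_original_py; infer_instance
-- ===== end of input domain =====

-- B re-implements the scatter loop as a gather: one inverse index (original position → source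
-- subcircuit index) built from the sorted keys, then one lookup per output slot (objective: alternative).

-- ===== PORT A =====
-- transliteration of _map_bitstring_to_original (Source A)
def map_bitstring_to_original_py (bitstring : String) (qubit_mapping : List (Int × Int)) : String :=
  let bits := bitstring.toList
  match PySem.List.max? (qubit_mapping.map Prod.snd) (fun v => v) with
  | none => ""          -- max() of an empty dict raises ValueError in Python; excluded by Pre_
  | some m =>
    let mapped := List.replicate (m + 1).toNat '0'   -- ['0'] * (max+1); Python's * clamps negative counts to 0 too
    let mapped := (PySem.List.enumerate bits 0).foldl (fun acc p =>
        match List.lookup p.1 qubit_mapping with     -- 'if subcircuit_idx in qubit_mapping' + first-match lookup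
        | some j => PySem.List.pySetD acc j p.2      -- mapped[qubit_mapping[subcircuit_idx]] = bit
        | none   => acc) mapped
    String.ofList mapped

-- ===== PORT B =====
-- transliteration of _map_bitstring_to_original (Source B)
def map_bitstring_to_original_py_alt (bitstring : String) (qubit_mapping : List (Int × Int)) : String :=
  match PySem.List.max? (qubit_mapping.map Prod.snd) (fun v => v) with
  | none => ""          -- same ValueError on the empty mapping; excluded by Pre_
  | some m =>
    let bits := bitstring.toList
    let n : Int := bits.length
    let inverse := (PySem.List.sorted (qubit_mapping.map Prod.fst) (fun k => k) false).foldl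
        (fun (inv : PySem.Dict Int Int) idx =>
          if 0 ≤ idx ∧ idx < n then
            match List.lookup idx qubit_mapping with
            | some v => inv.insert v idx
            | none   => inv                          -- unreachable: idx is a key
          else inv) PySem.Dict.empty
    String.ofList ((PySem.List.pyRange 0 (m + 1) 1).map (fun pos =>
        match inverse.get? pos with
        | some src => bits.getD src.toNat '0'        -- 0 ≤ src < n by construction, so this is bitstring[src]
        | none     => '0'))

-- ===== PRECONDITION & SPEC =====
-- Pre_ excludes the empty mapping (Python A raises ValueError there) and mappings that send an
-- in-range subcircuit index to a negative target position, which is outside the natural domain of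
-- qubit positions (A either raises IndexError or scatters through Python's negative-index wraparound there).
def Pre_map_bitstring_to_original_py (bitstring : String) (qubit_mapping : List (Int × Int)) : Prop :=
  qubit_mapping ≠ [] ∧
    ∀ p ∈ qubit_mapping, (0 ≤ p.1 ∧ p.1 < (bitstring.toList.length : Int)) → 0 ≤ p.2
instance (bitstring : String) (qubit_mapping : List (Int × Int)) : Decidable (Pre_map_bitstring_to_original_py bitstring qubit_mapping) := by unfold Pre_map_bitstring_to_original_py; infer_instance

def pvWitness_map_bitstring_to_original_py : String × (List (Int × Int)) := ("101", [(0, 2), (1, 0), (2, 4)])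

def Spec_map_bitstring_to_original_py (bitstring : String) (qubit_mapping : List (Int × Int)) (out : String) : Prop := out = map_bitstring_to_original_py_alt bitstring qubit_mapping
instance (bitstring : String) (qubit_mapping : List (Int × Int)) (out : String) : Decidable (Spec_map_bitstring_to_original_py bitstring qubit_mapping out) := by unfold Spec_map_bitstring_to_original_py; infer_instance

-- ===== CLAIM (what is proved, stated in full; the proofs are below) =====
def Claim_equal_map_bitstring_to_original_py : Prop := ∀ (bitstring : String) (qubit_mapping : List (Int × Int)), Dom_map_bitstring_to_original_py bitstring qubit_mapping → Pre_map_bitstring_to_original_py bitstring qubit_mapping → Spec_map_bitstring_to_original_py bitstring qubit_mapping (map_bitstring_to_original_py bitstring qubit_mapping)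

-- ===== LEMMAS AND PROOFS =====

-- pairwise ≤ list: getLast? is an upper bound
theorem pairwise_le_getLast?' {l : List Int} (h : l.Pairwise (· ≤ ·)) :
    ∀ x ∈ l, ∃ m, l.getLast? = some m ∧ x ≤ m := by
  induction l with
  | nil => intro x hx; simp at hx
  | cons a t ih =>
    intro x hx
    have htp : t.Pairwise (· ≤ ·) := List.Pairwise.sublist (List.sublist_cons_self _ _) h
    rcases List.mem_cons.mp hx with hxa | hxt
    · subst hxa
      cases t with
      | nil => exact ⟨x, rfl, le_refl x⟩
      | cons b t' =>
        have ht : b ∈ b :: t' := List.mem_cons_self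
        obtain ⟨m, hm, hbm⟩ := ih htp b ht
        exact ⟨m, by simpa [List.getLast?_cons_cons] using hm,
          le_trans ((List.pairwise_cons.mp h).1 b ht) hbm⟩
    · obtain ⟨m, hm, hxm⟩ := ih htp x hxt
      cases t with
      | nil => simp at hxt
      | cons b t' => exact ⟨m, by simpa [List.getLast?_cons_cons] using hm, hxm⟩

theorem pairwise_le_getLast? {l : List Int} (h : l.Pairwise (· ≤ ·)) {x : Int} (hx : x ∈ l) :
    ∃ m, l.getLast? = some m ∧ x ≤ m := pairwise_le_getLast?' h x hx

theorem getLast?_eq_of_sorted_mem {l1 l2 : List Int}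
    (h1 : l1.Pairwise (· ≤ ·)) (h2 : l2.Pairwise (· ≤ ·))
    (hm : ∀ x, x ∈ l1 ↔ x ∈ l2) : l1.getLast? = l2.getLast? := by
  match e1 : l1.getLast?, e2 : l2.getLast? with
  | none, none => rfl
  | some a, none =>
    have ha : a ∈ l1 := List.mem_of_getLast? e1
    have := (hm a).mp ha
    rcases pairwise_le_getLast? h2 this with ⟨m, hm2, _⟩
    rw [e2] at hm2; cases hm2
  | none, some b =>
    have hb : b ∈ l2 := List.mem_of_getLast? e2
    have := (hm b).mpr hb
    rcases pairwise_le_getLast? h1 this with ⟨m, hm1, _⟩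
    rw [e1] at hm1; cases hm1
  | some a, some b =>
    have ha : a ∈ l2 := (hm a).mp (List.mem_of_getLast? e1)
    have hb : b ∈ l1 := (hm b).mpr (List.mem_of_getLast? e2)
    rcases pairwise_le_getLast? h2 ha with ⟨m, hm2, hab⟩
    rcases pairwise_le_getLast? h1 hb with ⟨m', hm1, hba⟩
    rw [e2] at hm2; rw [e1] at hm1
    cases hm2; cases hm1
    exact congrArg some (le_antisymm hab hba)

-- A's scatter loop: length is preserved
theorem A_fold_length (qm : List (Int × Int)) (ps : List (Int × Char)) (init : List Char) :
    (ps.foldl (fun acc p =>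
        match List.lookup p.1 qm with
        | some j => PySem.List.pySetD acc j p.2
        | none   => acc) init).length = init.length := by
  induction ps generalizing init with
  | nil => rfl
  | cons p t ih =>
    rw [List.foldl_cons]
    cases h : List.lookup p.1 qm with
    | none => simpa [h] using ih init
    | some j => simpa [h, PySem.List.length_pySetD] using ih (PySem.List.pySetD init j p.2)

-- A's scatter loop, elementwise: last write to slot k wins, else the initial char
theorem A_fold_getD (qm : List (Int × Int)) (ps : List (Int × Char)) (init : List Char)
    (hv : ∀ p ∈ ps, ∀ j, List.lookup p.1 qm = some j → 0 ≤ j) (k : Nat) (hk : k < init.length) :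
    (ps.foldl (fun acc p =>
        match List.lookup p.1 qm with
        | some j => PySem.List.pySetD acc j p.2
        | none   => acc) init).getD k '0' =
    match (ps.filter (fun p => List.lookup p.1 qm == some (k : Int))).getLast? with
    | some p => p.2
    | none   => init.getD k '0' := by
  induction ps using List.reverseRecOn with
  | nil => simp
  | append_singleton l a ih =>
    rw [List.foldl_append, List.foldl_cons, List.foldl_nil, List.filter_append]
    have hvl : ∀ p ∈ l, ∀ j, List.lookup p.1 qm = some j → 0 ≤ j :=
      fun p hp => hv p (List.mem_append_left _ hp)
    have hva : ∀ j, List.lookup a.1 qm = some j → 0 ≤ j :=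
      hv a (List.mem_append_right _ List.mem_cons_self)
    have hlen := A_fold_length qm l init
    cases h : List.lookup a.1 qm with
    | none =>
      simp only [h]
      have : List.filter (fun p => List.lookup p.1 qm == some (k : Int)) [a] = [] := by
        simp [List.filter, h]
      rw [this, List.append_nil]
      exact ih hvl
    | some j =>
      have hj : 0 ≤ j := hva j h
      simp only [h]
      rw [PySem.List.pySetD_of_nonneg _ _ hj]
      by_cases hjk : j = (k : Int)
      · have hfa : List.filter (fun p => List.lookup p.1 qm == some (k : Int)) [a] = [a] := by
          simp [List.filter, h, beq_iff_eq, hjk]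
        rw [hfa, List.getLast?_concat]
        have ht : j.toNat = k := by omega
        rw [ht, List.getD_eq_getElem?_getD, List.getElem?_set_self (by omega)]
        simp
      · have hfa : List.filter (fun p => List.lookup p.1 qm == some (k : Int)) [a] = [] := by
          simp [List.filter, h, beq_eq_false_iff_ne.mpr hjk]
        rw [hfa, List.append_nil]
        have hne : j.toNat ≠ k := by omega
        rw [List.getD_eq_getElem?_getD, List.getElem?_set_ne hne, ← List.getD_eq_getElem?_getD]
        exact ih hvl

-- B's inverse-index loop: the last key written to an original position wins
theorem B_fold_get? (qm : List (Int × Int)) (n : Int) (ks : List Int) (d : PySem.Dict Int Int) (pos : Int) :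
    (ks.foldl (fun (inv : PySem.Dict Int Int) idx =>
        if 0 ≤ idx ∧ idx < n then
          match List.lookup idx qm with
          | some v => inv.insert v idx
          | none   => inv
        else inv) d).get? pos =
    match (ks.filter (fun idx => decide (0 ≤ idx ∧ idx < n) && (List.lookup idx qm == some pos))).getLast? with
    | some i => some i
    | none   => d.get? pos := by
  induction ks using List.reverseRecOn generalizing d with
  | nil => simp
  | append_singleton l a ih =>
    rw [List.foldl_append, List.foldl_cons, List.foldl_nil, List.filter_append]
    by_cases hr : 0 ≤ a ∧ a < n
    · cases h : List.lookup a qm with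
      | none =>
        have hfa : List.filter (fun idx => decide (0 ≤ idx ∧ idx < n) && (List.lookup idx qm == some pos)) [a] = [] := by
          simp [List.filter, h]
        rw [hfa, List.append_nil]
        simp only [if_pos hr, h]
        exact ih d
      | some v =>
        simp only [if_pos hr, h]
        by_cases hvp : v = pos
        · subst hvp
          have hfa : List.filter (fun idx => decide (0 ≤ idx ∧ idx < n) && (List.lookup idx qm == some v)) [a] = [a] := by
            simp [List.filter, h, hr]
          rw [hfa, List.getLast?_concat]
          exact PySem.Dict.get?_insert_self _ _ _
        · have hfa : List.filter (fun idx => decide (0 ≤ idx ∧ idx < n) && (List.lookup idx qm == some pos)) [a] = [] := by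
            simp [List.filter, h, beq_eq_false_iff_ne.mpr (fun e => hvp (by simpa using e))]
          rw [hfa, List.append_nil]
          rw [PySem.Dict.get?_insert_of_ne _ _ (fun e => hvp e.symm)]
          exact ih d
    · have hfa : List.filter (fun idx => decide (0 ≤ idx ∧ idx < n) && (List.lookup idx qm == some pos)) [a] = [] := by
        simp [List.filter, hr]
      rw [hfa, List.append_nil, if_neg hr]
      exact ih d

theorem eq_map_range_getD (xs : List Char) (d : Char) :
    xs = (List.range xs.length).map (fun k => xs.getD k d) := by
  apply List.ext_getElem
  · simp
  · intro i h1 h2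
    simp [List.getD_eq_getElem?_getD, List.getElem?_eq_getElem, h1]

-- the two per-position candidate lists have the same members
theorem lookup_mem' {l : List (Int × Int)} {k v : Int} (h : List.lookup k l = some v) : (k, v) ∈ l := by
  induction l with
  | nil => simp [List.lookup] at h
  | cons p t ih =>
    rw [List.lookup] at h
    by_cases hk : k == p.1
    · rw [hk] at h
      simp only [Option.some.injEq] at h
      have hkk : k = p.1 := beq_iff_eq.mp hk
      have : (k, v) = p := by rw [hkk, ← h]
      rw [this]; exact List.mem_cons_self
    · have : (k == p.1) = false := by simpa using (fun e => hk (by simp [e]))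
      rw [this] at h
      exact List.mem_cons_of_mem _ (ih h)

theorem lookup_mem_keys' {l : List (Int × Int)} {k v : Int} (h : List.lookup k l = some v) : k ∈ l.map Prod.fst :=
  List.mem_map.mpr ⟨(k, v), lookup_mem' h, rfl⟩

theorem mem_cand_iff (qm : List (Int × Int)) (bits : List Char) (k : Nat) (x : Int) :
    (x ∈ ((PySem.List.enumerate bits 0).filter
        (fun p => List.lookup p.1 qm == some (k : Int))).map Prod.fst) ↔
    (x ∈ (PySem.List.sorted (qm.map Prod.fst) (fun j => j) false).filter
        (fun idx => decide (0 ≤ idx ∧ idx < (bits.length : Int)) && (List.lookup idx qm == some (k : Int)))) := by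
  have hmem1 : (x ∈ ((PySem.List.enumerate bits 0).filter
      (fun p => List.lookup p.1 qm == some (k : Int))).map Prod.fst) ↔
      (0 ≤ x ∧ x < (bits.length : Int) ∧ List.lookup x qm = some (k : Int)) := by
    constructor
    · intro hx
      obtain ⟨p, hp, rfl⟩ := List.mem_map.mp hx
      have hpe := List.mem_filter.mp hp
      obtain ⟨i, hi, rfl⟩ := (PySem.List.mem_enumerate_iff _ _ _).mp hpe.1
      have hlk := beq_iff_eq.mp hpe.2
      refine ⟨by simp, by simp; exact_mod_cast hi, hlk⟩
    · rintro ⟨hx0, hxn, hlk⟩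
      have hi : x.toNat < bits.length := by omega
      have hxx : ((0 : Int) + ↑x.toNat) = x := by omega
      apply List.mem_map.mpr
      refine ⟨((0 : Int) + ↑x.toNat, bits[x.toNat]), List.mem_filter.mpr ⟨?_, ?_⟩, hxx⟩
      · exact (PySem.List.mem_enumerate_iff _ _ _).mpr ⟨x.toNat, hi, rfl⟩
      · simp only [hxx]; exact beq_iff_eq.mpr hlk
  have hmem2 : (x ∈ (PySem.List.sorted (qm.map Prod.fst) (fun j => j) false).filter
      (fun idx => decide (0 ≤ idx ∧ idx < (bits.length : Int)) && (List.lookup idx qm == some (k : Int)))) ↔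
      (0 ≤ x ∧ x < (bits.length : Int) ∧ List.lookup x qm = some (k : Int)) := by
    rw [List.mem_filter]
    constructor
    · rintro ⟨_, hb⟩
      simp only [Bool.and_eq_true, decide_eq_true_eq, beq_iff_eq] at hb
      exact ⟨hb.1.1, hb.1.2, hb.2⟩
    · rintro ⟨hx0, hxn, hlk⟩
      refine ⟨((PySem.List.sorted_perm _ _ _).mem_iff).mpr (lookup_mem_keys' hlk), ?_⟩
      simp [hx0, hxn, hlk]
  rw [hmem1, hmem2]

theorem char_eq (qm : List (Int × Int)) (bits : List Char) (k : Nat) :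
    (match ((PySem.List.enumerate bits 0).filter
        (fun p => List.lookup p.1 qm == some (k : Int))).getLast? with
     | some p => p.2
     | none => '0') =
    (match ((PySem.List.sorted (qm.map Prod.fst) (fun j => j) false).filter
        (fun idx => decide (0 ≤ idx ∧ idx < (bits.length : Int)) && (List.lookup idx qm == some (k : Int)))).getLast? with
     | some i => bits.getD i.toNat '0'
     | none => '0') := by
  have pw1 : (((PySem.List.enumerate bits 0).filter
      (fun p => List.lookup p.1 qm == some (k : Int))).map Prod.fst).Pairwise (· ≤ ·) := by
    apply List.Pairwise.imp (fun h => le_of_lt h)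
    apply List.pairwise_map.mpr
    exact List.Pairwise.filter _ (PySem.List.pairwise_lt_enumerate bits 0)
  have pw2 : ((PySem.List.sorted (qm.map Prod.fst) (fun j => j) false).filter
      (fun idx => decide (0 ≤ idx ∧ idx < (bits.length : Int)) && (List.lookup idx qm == some (k : Int)))).Pairwise (· ≤ ·) :=
    List.Pairwise.filter _ (PySem.List.sorted_pairwise _ _)
  have hL := getLast?_eq_of_sorted_mem pw1 pw2 (mem_cand_iff qm bits k)
  rw [List.getLast?_map] at hL
  cases e : ((PySem.List.enumerate bits 0).filter
      (fun p => List.lookup p.1 qm == some (k : Int))).getLast? with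
  | none =>
    rw [e] at hL
    simp only [Option.map_none] at hL
    rw [← hL]
  | some p =>
    rw [e] at hL
    simp only [Option.map_some] at hL
    rw [← hL]
    have hp : p ∈ (PySem.List.enumerate bits 0).filter (fun p => List.lookup p.1 qm == some (k : Int)) :=
      List.mem_of_getLast? e
    obtain ⟨i, hi, rfl⟩ := (PySem.List.mem_enumerate_iff _ _ _).mp (List.mem_of_mem_filter hp)
    simp [List.getD_eq_getElem?_getD, List.getElem?_eq_getElem, hi]


-- a fold whose every lookup misses leaves the buffer unchanged
theorem A_fold_id (qm : List (Int × Int)) (ps : List (Int × Char)) (init : List Char)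
    (h : ∀ p ∈ ps, List.lookup p.1 qm = none) :
    (ps.foldl (fun acc p =>
        match List.lookup p.1 qm with
        | some j => PySem.List.pySetD acc j p.2
        | none   => acc) init) = init := by
  induction ps with
  | nil => rfl
  | cons p t ih =>
    rw [List.foldl_cons, h p List.mem_cons_self]
    exact ih (fun q hq => h q (List.mem_cons_of_mem _ hq))

theorem main' (bitstring : String) (qm : List (Int × Int))
    (hne : qm ≠ [])
    (hpos : ∀ p ∈ qm, (0 ≤ p.1 ∧ p.1 < (bitstring.toList.length : Int)) → 0 ≤ p.2) :
    map_bitstring_to_original_py bitstring qm = map_bitstring_to_original_py_alt bitstring qm := by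
  cases e : PySem.List.max? (qm.map Prod.snd) (fun v => v) with
  | none =>
    exact absurd (List.map_eq_nil_iff.mp ((PySem.List.max?_eq_none_iff _ _).mp e)) hne
  | some m =>
    rw [map_bitstring_to_original_py, map_bitstring_to_original_py_alt]
    simp only [e]
    have hv : ∀ p ∈ PySem.List.enumerate bitstring.toList 0, ∀ j,
        List.lookup p.1 qm = some j → 0 ≤ j := by
      intro p hp j hj
      obtain ⟨i, hi, rfl⟩ := (PySem.List.mem_enumerate_iff _ _ _).mp hp
      refine hpos _ (lookup_mem' hj) ⟨by simp, ?_⟩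
      simp only [zero_add]
      exact_mod_cast hi
    by_cases hm : 0 ≤ m
    · set size := (m + 1).toNat with hsizedef
      have hsize : ((size : Nat) : Int) = m + 1 := by omega
      have hlenA : ((PySem.List.enumerate bitstring.toList 0).foldl (fun acc p =>
          match List.lookup p.1 qm with
          | some j => PySem.List.pySetD acc j p.2
          | none   => acc) (List.replicate size '0')).length = size :=
        (A_fold_length qm _ _).trans (List.length_replicate)
      apply congrArg String.ofList
      have hrange : PySem.List.pyRange 0 (m + 1) 1 = (List.range size).map (fun (k : Nat) => (k : Int)) := by
        rw [← hsize]; exact PySem.List.pyRange_zero_natCast size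
      rw [hrange, List.map_map]
      conv_lhs => rw [eq_map_range_getD ((PySem.List.enumerate bitstring.toList 0).foldl (fun acc p =>
          match List.lookup p.1 qm with
          | some j => PySem.List.pySetD acc j p.2
          | none   => acc) (List.replicate size '0')) '0', hlenA]
      apply List.map_congr_left
      intro k hk
      have hks : k < size := List.mem_range.mp hk
      rw [A_fold_getD qm _ _ hv k (by simpa using hks)]
      have hinit : (List.replicate size '0').getD k '0' = '0' := by
        simp [List.getD_eq_getElem?_getD, hks]
      rw [hinit]
      simp only [Function.comp_apply]
      rw [B_fold_get? qm (bitstring.toList.length : Int) _ PySem.Dict.empty (k : Int)]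
      simp only [PySem.Dict.get?_empty]
      have := char_eq qm bitstring.toList k
      cases e2 : ((PySem.List.sorted (qm.map Prod.fst) (fun j => j) false).filter
          (fun idx => decide (0 ≤ idx ∧ idx < (bitstring.toList.length : Int)) && (List.lookup idx qm == some (k : Int)))).getLast? with
      | none => rw [e2] at this; simpa [e2] using this
      | some i => rw [e2] at this; simpa [e2] using this
    · -- max+1 ≤ 0: no slot exists, no in-range key can be mapped, both return ""
      have hnone : ∀ p ∈ PySem.List.enumerate bitstring.toList 0, List.lookup p.1 qm = none := by
        intro p hp
        cases hl : List.lookup p.1 qm with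
        | none => rfl
        | some j =>
          have h0 : 0 ≤ j := hv p hp j hl
          have hjm : j ≤ m :=
            PySem.List.max?_isMax e _ (List.mem_map.mpr ⟨_, lookup_mem' hl, rfl⟩)
          omega
      have hz : (m + 1).toNat = 0 := by omega
      rw [A_fold_id qm _ _ hnone, hz]
      have hr : PySem.List.pyRange 0 (m + 1) 1 = [] := by
        apply List.eq_nil_iff_forall_not_mem.mpr
        intro x hx
        have := (PySem.List.mem_pyRange_one).mp hx
        omega
      rw [hr]
      rfl

-- ===== VERDICT (by name: the statement is the Claim_ definition above) =====
theorem map_bitstring_to_original_py_spec : Claim_equal_map_bitstring_to_original_py := by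
  intro bitstring qubit_mapping _ hpre
  unfold Spec_map_bitstring_to_original_py
  exact main' bitstring qubit_mapping hpre.1 hpre.2
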